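-- pv_equiv track=rewrite | github.com/subhash1599/Daily_Code | Searching/search_infinite_array.py | infinite_array_search
-- ===== SOURCE A (Python) =====
-- def infinite_array_search(arr,key):
--     i=0
--     while(True):
--         if(arr[i]==key):
--             return i
--         elif(arr[i]>key):
--             return -1
--         i+=1
-- ===== SOURCE B (Python) =====
-- def infinite_array_search(arr, key):
--     # Backward scan: compute the leftmost index j with arr[j] >= key (lower bound),
--     # then decide with a single comparison. Order of the scan does not matter for j.
--     n = len(arr)
--     j = n
--     for i in range(n - 1, -1, -1):
--         if arr[i] >= key:
--             j = i
--     if j < n and arr[j] == key: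
--         return j
--     return -1
-- ===== Notes on version B (the rewrite author's own statement) =====
-- stated objective: alternative
-- what changed: B scans the array backwards to compute the leftmost lower-bound index (first j with arr[j] >= key) as a fold, then decides with a single equality comparison, instead of A's early-exit forward scan with two returns inside the loop.
-- crash fix: A raises IndexError whenever every element is smaller than key (its scan runs off the end of the list); B returns -1 there. — e.g. on infinite_array_search([1, 2], 5): A raises IndexError, B returns -1
import Mathlib
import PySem

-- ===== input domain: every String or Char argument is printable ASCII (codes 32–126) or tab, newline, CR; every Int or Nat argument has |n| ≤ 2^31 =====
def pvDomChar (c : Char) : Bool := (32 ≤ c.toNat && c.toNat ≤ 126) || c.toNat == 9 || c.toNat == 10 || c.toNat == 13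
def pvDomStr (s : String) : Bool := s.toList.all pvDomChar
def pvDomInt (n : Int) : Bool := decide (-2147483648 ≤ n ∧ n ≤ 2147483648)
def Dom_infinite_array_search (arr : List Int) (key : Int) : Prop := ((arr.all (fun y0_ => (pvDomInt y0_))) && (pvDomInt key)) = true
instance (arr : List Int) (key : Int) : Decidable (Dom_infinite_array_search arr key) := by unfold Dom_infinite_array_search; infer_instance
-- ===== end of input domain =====

-- B computes the leftmost lower-bound index by a backward scan and then decides with one comparison,
-- instead of A's early-exit forward scan with two returns inside the loop (objective: alternative).


-- ===== PORT A =====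
-- A's while-loop: i walks right; return i on arr[i] == key, -1 on arr[i] > key.
-- The [] case is where Python's arr[i] raises IndexError (outside Pre_); the value -2 there is arbitrary.
def aGo (key : Int) : List Int → Int → Int
  | [], _ => -2
  | x :: rest, i => if x = key then i else if x > key then -1 else aGo key rest (i + 1)

def infinite_array_search (arr : List Int) (key : Int) : Int := aGo key arr 0

-- ===== PORT B =====
-- Source B: j = n; for i in range(n-1, -1, -1): if arr[i] >= key: j = i;  then one comparison.
def infinite_array_search_alt (arr : List Int) (key : Int) : Int :=
  let n : Int := arr.length
  let j := (PySem.List.pyRange (n - 1) (-1) (-1)).foldl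
    (fun j i => if key ≤ PySem.List.pyGetD arr i 0 then i else j) n
  if j < n then
    if PySem.List.pyGetD arr j 0 = key then j else -1
  else -1

-- ===== PRECONDITION & SPEC =====
-- Pre_ excludes exactly the inputs on which A raises: when every element is < key,
-- A's scan runs off the end of the list and Python raises IndexError.
def Pre_infinite_array_search (arr : List Int) (key : Int) : Prop := ∃ x ∈ arr, key ≤ x
instance (arr : List Int) (key : Int) : Decidable (Pre_infinite_array_search arr key) := by
  unfold Pre_infinite_array_search; infer_instance

def pvWitness_infinite_array_search : List Int × Int := ([7, 1, 3, 3], 3)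

-- A raises IndexError whenever every element is smaller than key (the scan runs off the end); B returns -1 there.
def Raises_infinite_array_search (arr : List Int) (key : Int) : Prop := ∀ x ∈ arr, x < key
instance (arr : List Int) (key : Int) : Decidable (Raises_infinite_array_search arr key) := by
  unfold Raises_infinite_array_search; infer_instance
def pvRaiseWitness_infinite_array_search : List Int × Int := ([1, 2], 5)
def pvRaiseWitnessOut_infinite_array_search : Int := -1

def Spec_infinite_array_search (arr : List Int) (key : Int) (out : Int) : Prop := out = infinite_array_search_alt arr key
instance (arr : List Int) (key : Int) (out : Int) : Decidable (Spec_infinite_array_search arr key out) := by unfold Spec_infinite_array_search; infer_instance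

-- ===== CLAIM (what is proved, stated in full; the proofs are below) =====
def Claim_equal_infinite_array_search : Prop := ∀ (arr : List Int) (key : Int), Dom_infinite_array_search arr key → Pre_infinite_array_search arr key → Spec_infinite_array_search arr key (infinite_array_search arr key)

def Claim_raises_infinite_array_search : Prop := (∀ (arr : List Int) (key : Int), Dom_infinite_array_search arr key → Raises_infinite_array_search arr key → ¬ Pre_infinite_array_search arr key) ∧ (Dom_infinite_array_search (pvRaiseWitness_infinite_array_search.1) (pvRaiseWitness_infinite_array_search.2) ∧ Raises_infinite_array_search (pvRaiseWitness_infinite_array_search.1) (pvRaiseWitness_infinite_array_search.2) ∧ infinite_array_search_alt (pvRaiseWitness_infinite_array_search.1) (pvRaiseWitness_infinite_array_search.2) = pvRaiseWitnessOut_infinite_array_search)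

-- ===== LEMMAS AND PROOFS =====

-- A's scan returns the first index j with key ≤ arr[j] (as i + j) if arr[j] = key, else -1.
lemma aGo_eq (key : Int) (arr : List Int) (i : Int) (hex : ∃ x ∈ arr, key ≤ x) :
    aGo key arr i =
      (if arr.getD (arr.findIdx fun x => decide (key ≤ x)) 0 = key
       then i + ((arr.findIdx fun x => decide (key ≤ x) : Nat) : Int) else -1) := by
  induction arr generalizing i with
  | nil => simp at hex
  | cons x rest ih =>
    by_cases hk : key ≤ x
    · simp only [aGo, List.findIdx_cons, hk, decide_true, cond_true, List.getD_cons_zero]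
      by_cases hx : x = key
      · simp [hx]
      · have : x > key := lt_of_le_of_ne hk (fun h => hx h.symm)
        simp [hx, this]
    · have hxk : x ≠ key := by intro h; exact hk (le_of_eq h.symm)
      have hxg : ¬ x > key := by intro h; exact hk (le_of_lt h)
      have hex' : ∃ y ∈ rest, key ≤ y := by
        obtain ⟨y, hy, hky⟩ := hex
        rcases List.mem_cons.1 hy with rfl | hy'
        · exact absurd hky hk
        · exact ⟨y, hy', hky⟩
      simp only [aGo, hxk, if_false, hxg, List.findIdx_cons, hk, decide_false, cond_false,
        List.getD_cons_succ]
      rw [ih (i + 1) hex']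
      split
      · push_cast; ring
      · rfl

-- B's fold, read right-to-left (foldr over the ascending indices), keeps the LEAST index i < m
-- with key ≤ arr[i] (and the seed if there is none): the traversal order does not matter.
lemma foldr_range_eq (arr : List Int) (key : Int) :
    ∀ (m : Nat), m ≤ arr.length → ∀ (j0 : Int),
      List.foldr (fun i j => if key ≤ PySem.List.pyGetD arr i 0 then i else j) j0
          (List.map (fun k : Nat => (k : Int)) (List.range m)) =
        (if (arr.findIdx fun x => decide (key ≤ x)) < m
         then ((arr.findIdx fun x => decide (key ≤ x) : Nat) : Int) else j0) := by
  intro m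
  set j := (arr.findIdx fun x => decide (key ≤ x)) with hj
  induction m with
  | zero => intro _ j0; simp
  | succ m ih =>
    intro hm j0
    rw [List.range_succ, List.map_append, List.foldr_append]
    simp only [List.map_cons, List.map_nil, List.foldr_cons, List.foldr_nil]
    have hmlt : m < arr.length := by omega
    have hget : PySem.List.pyGetD arr ((m : Nat) : Int) 0 = arr[m] := by
      rw [PySem.List.pyGetD_natCast, List.getD_eq_getElem arr 0 hmlt]
    rw [hget, ih (by omega)]
    rcases Nat.lt_trichotomy j m with h | h | h
    · rw [if_pos h, if_pos (by omega)]
    · have hp : key ≤ arr[m] := by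
        have := @List.findIdx_getElem _ (fun x => decide (key ≤ x)) arr (by omega)
        simp only [decide_eq_true_eq] at this
        subst h; exact this
      rw [if_neg (by omega), if_pos hp, if_pos (by omega), h]
    · have hnp : ¬ key ≤ arr[m] := by
        have := @List.not_of_lt_findIdx _ (fun x => decide (key ≤ x)) arr m (hj ▸ h)
        simpa using this
      rw [if_neg (by omega), if_neg hnp, if_neg (by omega)]

-- ===== VERDICT (by name: the statement is the Claim_ definition above) =====
theorem infinite_array_search_spec : Claim_equal_infinite_array_search := by
  intro arr key _ hpre
  unfold Spec_infinite_array_search infinite_array_search infinite_array_search_alt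
  set j := (arr.findIdx fun x => decide (key ≤ x)) with hj
  have hjlt : j < arr.length := by
    rw [hj, List.findIdx_lt_length]
    obtain ⟨x, hx, hkx⟩ := hpre
    exact ⟨x, hx, by simpa using hkx⟩
  -- rewrite B's countdown fold into the ascending foldr and apply the fold lemma
  have hrev : PySem.List.pyRange ((arr.length : Int) - 1) (-1) (-1)
      = (PySem.List.pyRange 0 (arr.length : Int) 1).reverse := by
    rw [PySem.List.pyRange_neg_one_eq_reverse]
    norm_num
  rw [aGo_eq key arr 0 hpre, ← hj]
  dsimp only
  rw [hrev, List.foldl_reverse, PySem.List.pyRange_one]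
  simp only [sub_zero, Int.toNat_natCast, zero_add]
  rw [foldr_range_eq arr key arr.length (le_refl _) (arr.length : Int), ← hj, if_pos hjlt]
  have hgetj : PySem.List.pyGetD arr ((j : Nat) : Int) 0 = arr[j] := by
    rw [PySem.List.pyGetD_natCast, List.getD_eq_getElem arr 0 hjlt]
  rw [hgetj, List.getD_eq_getElem arr 0 hjlt,
    if_pos (show ((j : Nat) : Int) < (arr.length : Int) by exact_mod_cast hjlt)]

@[simp] theorem infinite_array_search_raises : Claim_raises_infinite_array_search := by
  unfold Claim_raises_infinite_array_search
  constructor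
  · intro arr key _ hr hpre
    obtain ⟨x, hx, hkx⟩ := hpre
    exact absurd (hr x hx) (not_lt.2 hkx)
  · exact ⟨by decide, by decide, by decide⟩
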